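-- pv_equiv track=rewrite | github.com/GumercindoVera20/Mini-IDE-Web | turing.py | simular_mt
-- ===== SOURCE A (Python) =====
-- def simular_mt(cadena):
--     if not set(cadena).issubset({"a", "b"}):
--         return "Cadena inválida (caracteres no válidos)", []
--
--     cinta = list(cadena)
--     estado = "q0"
--     i = 0
--     pasos = []
--
--     while True:
--         if i >= len(cinta):
--             pasos.append((estado, ''.join(cinta), i))
--             return "Cadena inválida", pasos
--
--         simbolo = cinta[i]
--         pasos.append((estado, ''.join(cinta), i))
--
--         if estado == "q0":
--             if simbolo == "a":
--                 cinta[i] = "X"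
--                 i += 1
--                 estado = "q1"
--             elif simbolo == "Y":
--                 estado = "qf"
--             elif simbolo == "b":
--                 return "Cadena inválida", pasos
--             else:
--                 return "Cadena inválida", pasos
--
--         elif estado == "q1":
--             if simbolo == "a":
--                 i += 1
--             elif simbolo == "b":
--                 cinta[i] = "Y"
--                 i -= 1
--                 estado = "q2"
--             elif simbolo == "Y":
--                 i += 1
--             else:
--                 return "Cadena inválida", pasos
--
--         elif estado == "q2":
--             if cinta[i] != "X":
--                 i -= 1
--             else:
--                 i += 1
--                 estado = "q0"
--
--         elif estado == "qf":
--             # Verificar si quedan b sin marcar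
--             if any(c in ["a", "b"] for c in cinta):
--                 return "Cadena inválida", pasos
--             else:
--                 return "Cadena válida", pasos
-- ===== SOURCE B (Python) =====
-- # B computes the list of b-positions of the input once and drives the run by
-- # position arithmetic: one outer loop per marking round (no state variable, no
-- # per-step symbol dispatch), each phase's snapshots emitted by range loops over
-- # indices, and acceptance decided from the b-position list instead of re-scanning
-- # the tape.
--
-- def simular_mt(cadena):
--     if set(cadena) - {"a", "b"}:
--         return "Cadena inválida (caracteres no válidos)", []
--
--     n = len(cadena)
--     bpos = [k for k, c in enumerate(cadena) if c == "b"]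
--     t = list(cadena)
--     pasos = []
--     r = 0
--     while r < n and cadena[r] == "a":
--         pasos.append(("q0", "".join(t), r))
--         t[r] = "X"
--         tape = "".join(t)
--         if len(bpos) <= r:
--             # no unmarked b remains: the q1 sweep falls off the right end
--             for k in range(r + 1, n + 1):
--                 pasos.append(("q1", tape, k))
--             return "Cadena inválida", pasos
--         j = bpos[r]
--         for k in range(r + 1, j + 1):
--             pasos.append(("q1", tape, k))
--         t[j] = "Y"
--         tape = "".join(t)
--         for k in range(j - 1, r - 1, -1):
--             pasos.append(("q2", tape, k))
--         r += 1
--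
--     tape = "".join(t)
--     pasos.append(("q0", tape, r))
--     if r >= n:
--         return "Cadena inválida", pasos
--     if r == 0:
--         # the very first symbol is b: q0 rejects immediately
--         return "Cadena inválida", pasos
--     pasos.append(("qf", tape, r))
--     if n == 2 * r and bpos == list(range(r, n)):
--         return "Cadena válida", pasos
--     return "Cadena inválida", pasos
-- ===== Notes on version B (the rewrite author's own statement) =====
-- stated objective: alternative
-- what changed: B precomputes the list of b-positions once and replaces A's per-step state-machine dispatch by one outer loop per marking round: the q1/q2 sweeps become index range loops that never read the tape (the target cell comes from the b-position list), and acceptance is decided by position arithmetic (bpos == range(r, n) and n == 2r) instead of re-scanning the tape for unmarked symbols.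
import Mathlib
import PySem

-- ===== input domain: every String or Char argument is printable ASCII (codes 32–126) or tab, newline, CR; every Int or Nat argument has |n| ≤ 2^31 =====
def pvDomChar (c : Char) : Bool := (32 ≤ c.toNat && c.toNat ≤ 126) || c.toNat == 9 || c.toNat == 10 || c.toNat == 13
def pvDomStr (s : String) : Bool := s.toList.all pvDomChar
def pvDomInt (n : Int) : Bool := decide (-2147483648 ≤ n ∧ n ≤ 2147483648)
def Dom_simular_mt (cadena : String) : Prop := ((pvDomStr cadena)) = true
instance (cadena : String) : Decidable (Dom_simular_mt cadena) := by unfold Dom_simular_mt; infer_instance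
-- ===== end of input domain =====

-- B precomputes the list of b-positions once and runs one outer loop per marking round
-- (no state variable, no per-step symbol dispatch; acceptance decided by position
-- arithmetic); same return value as A (objective: alternative, not faster).

-- ===== PORT A =====
-- The while-True loop, as fuel recursion; the fuel passed at the top level,
-- (len+1)*(2*len+2)+2, exceeds the number of iterations the Python loop ever performs.
-- On fuel exhaustion (unreachable) and on a cinta[i] IndexError (unreachable:
-- i < -len never occurs from the initial state) it returns ("", []).
def simular_mt_loopA (fuel : Nat) (cinta : List Char) (estado : String) (i : Int)
    (pasos : List (String × String × Int)) : String × List (String × String × Int) :=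
  match fuel with
  | 0 => ("", [])
  | fuel + 1 =>
    if (cinta.length : Int) ≤ i then
      ("Cadena inválida", pasos ++ [(estado, String.ofList cinta, i)])
    else
      match PySem.List.pyGet? cinta i with
      | none => ("", [])
      | some simbolo =>
        let pasos := pasos ++ [(estado, String.ofList cinta, i)]
        if estado = "q0" then
          if simbolo = 'a' then
            simular_mt_loopA fuel (PySem.List.pySetD cinta i 'X') "q1" (i + 1) pasos
          else if simbolo = 'Y' then
            simular_mt_loopA fuel cinta "qf" i pasos
          else if simbolo = 'b' then ("Cadena inválida", pasos)
          else ("Cadena inválida", pasos)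
        else if estado = "q1" then
          if simbolo = 'a' then simular_mt_loopA fuel cinta "q1" (i + 1) pasos
          else if simbolo = 'b' then
            simular_mt_loopA fuel (PySem.List.pySetD cinta i 'Y') "q2" (i - 1) pasos
          else if simbolo = 'Y' then simular_mt_loopA fuel cinta "q1" (i + 1) pasos
          else ("Cadena inválida", pasos)
        else if estado = "q2" then
          if simbolo ≠ 'X' then simular_mt_loopA fuel cinta "q2" (i - 1) pasos
          else simular_mt_loopA fuel cinta "q0" (i + 1) pasos
        else if estado = "qf" then
          if cinta.any (fun c => c == 'a' || c == 'b') then ("Cadena inválida", pasos)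
          else ("Cadena válida", pasos)
        else
          simular_mt_loopA fuel cinta estado i pasos

def simular_mt (cadena : String) : String × (List (String × String × Int)) :=
  if !(PySem.Set.issubset (PySem.Set.ofList cadena.toList) (PySem.Set.ofList ['a', 'b'])) then
    ("Cadena inválida (caracteres no válidos)", [])
  else
    let cinta := cadena.toList
    simular_mt_loopA ((cinta.length + 1) * (2 * cinta.length + 2) + 2) cinta "q0" 0 []

-- ===== PORT B =====
-- bpos = [k for k, c in enumerate(cadena) if c == "b"]
def pvBpos (s : List Char) : List Int :=
  ((PySem.List.enumerate s 0).filter (fun kc => kc.2 == 'b')).map (fun kc => kc.1)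


def simular_mt_loopB (s : List Char) (bpos : List Int) (t : List Char) (r : Int)
    (pasos : List (String × String × Int)) : String × List (String × String × Int) :=
  if r < (s.length : Int) ∧ PySem.List.pyGet? s r = some 'a' then
    let pasos := pasos ++ [("q0", String.ofList t, r)]
    let t := PySem.List.pySetD t r 'X'
    let tape := String.ofList t
    if (bpos.length : Int) ≤ r then
      ("Cadena inválida",
        (PySem.List.pyRange (r + 1) ((s.length : Int) + 1) 1).foldl
          (fun ps k => ps ++ [("q1", tape, k)]) pasos)
    else
      match PySem.List.pyGet? bpos r with
      | none => ("", [])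
      | some j =>
        let pasos := (PySem.List.pyRange (r + 1) (j + 1) 1).foldl
          (fun ps k => ps ++ [("q1", tape, k)]) pasos
        let t := PySem.List.pySetD t j 'Y'
        let tape := String.ofList t
        let pasos := (PySem.List.pyRange (j - 1) (r - 1) (-1)).foldl
          (fun ps k => ps ++ [("q2", tape, k)]) pasos
        simular_mt_loopB s bpos t (r + 1) pasos
  else
    let tape := String.ofList t
    let pasos := pasos ++ [("q0", tape, r)]
    if (s.length : Int) ≤ r then ("Cadena inválida", pasos)
    else if r = 0 then ("Cadena inválida", pasos)
    else
      let pasos := pasos ++ [("qf", tape, r)]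
      if (s.length : Int) = 2 * r ∧ bpos = PySem.List.pyRange r (s.length : Int) 1 then
        ("Cadena válida", pasos)
      else ("Cadena inválida", pasos)
termination_by (s.length + 1 - r).toNat
decreasing_by omega


def simular_mt_alt (cadena : String) : String × (List (String × String × Int)) :=
  if PySem.Set.diff (PySem.Set.ofList cadena.toList) ['a', 'b'] ≠ [] then
    ("Cadena inválida (caracteres no válidos)", [])
  else
    simular_mt_loopB cadena.toList (pvBpos cadena.toList) cadena.toList 0 []

-- ===== PRECONDITION & SPEC =====
def Spec_simular_mt (cadena : String) (out : String × (List (String × String × Int))) : Prop := out = simular_mt_alt cadena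
instance (cadena : String) (out : String × (List (String × String × Int))) : Decidable (Spec_simular_mt cadena out) := by unfold Spec_simular_mt; infer_instance

-- ===== CLAIM (what is proved, stated in full; the proofs are below) =====
def Claim_equal_simular_mt : Prop := ∀ (cadena : String), Dom_simular_mt cadena → Spec_simular_mt cadena (simular_mt cadena)

-- ===== LEMMAS AND PROOFS =====

-- b-positions as naturals; pvThr s r is the threshold below which b's are marked 'Y'
-- after r rounds; pvMark s x y is the tape after x 'X'-marks and those 'Y'-marks
def pvBposN (s : List Char) : List Nat :=
  (List.range s.length).filter (fun k => s.getD k 'a' == 'b')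

theorem pvBpos_eq (s : List Char) : pvBpos s = (pvBposN s).map (fun k : Nat => (k : Int)) := by
  rw [pvBpos, PySem.List.enumerate_eq_map_pyRange s 'a', PySem.List.pyRange_zero, pvBposN]
  simp [List.filter_map, Function.comp_def]

theorem pvBposN_mem (s : List Char) (k : Nat) :
    k ∈ pvBposN s ↔ k < s.length ∧ s.getD k 'a' = 'b' := by
  simp [pvBposN]

theorem pvBposN_pairwise (s : List Char) : (pvBposN s).Pairwise (· < ·) :=
  List.Pairwise.filter _ List.pairwise_lt_range

theorem pvBposN_mono (s : List Char) (m1 m2 : Nat) (h : m1 < m2)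
    (h2 : m2 < (pvBposN s).length) : (pvBposN s)[m1]'(by omega) < (pvBposN s)[m2] :=
  (List.pairwise_iff_getElem.mp (pvBposN_pairwise s)) m1 m2 (by omega) h2 h

theorem pvBposN_elem (s : List Char) (m : Nat) (h : m < (pvBposN s).length) :
    (pvBposN s)[m] < s.length ∧ s.getD ((pvBposN s)[m]) 'a' = 'b' :=
  (pvBposN_mem s _).mp (List.getElem_mem h)

theorem pvBposN_least (s : List Char) (k : Nat) (hk : k ∈ pvBposN s) :
    ∃ h : 0 < (pvBposN s).length, (pvBposN s)[0] ≤ k := by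
  obtain ⟨m, hm, hmk⟩ := List.mem_iff_getElem.mp hk
  refine ⟨by omega, ?_⟩
  rcases Nat.eq_zero_or_pos m with h | h
  · subst h; omega
  · have := pvBposN_mono s 0 m h hm; omega

theorem pvBposN_ge (s : List Char) (r k : Nat) (hH : ∀ m, m < r → m < s.length → s.getD m 'a' = 'a')
    (hk : k ∈ pvBposN s) : r ≤ k := by
  rw [pvBposN_mem] at hk
  by_contra h
  have := hH k (by omega) hk.1
  rw [hk.2] at this
  exact absurd this (by decide)

def pvThr (s : List Char) (r : Nat) : Nat :=
  if h : r < (pvBposN s).length then (pvBposN s)[r] else s.length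

def pvMark (s : List Char) (x y : Nat) : List Char :=
  s.mapIdx (fun k c => if k < x then 'X' else if c = 'b' ∧ k < y then 'Y' else c)

theorem pvMark_length (s : List Char) (x y : Nat) : (pvMark s x y).length = s.length := by
  simp [pvMark]

theorem pvMark_pyGet (s : List Char) (x y k : Nat) (hk : k < s.length) :
    PySem.List.pyGet? (pvMark s x y) (k : Int) =
      some (if k < x then 'X' else if s.getD k 'a' = 'b' ∧ k < y then 'Y' else s.getD k 'a') := by
  rw [PySem.List.pyGet?_natCast, pvMark, List.getElem?_eq_getElem (by simpa using hk)]
  simp [List.getD_eq_getElem?_getD, List.getElem?_eq_getElem hk]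

theorem pvMark_set_X (s : List Char) (r y : Nat) :
    (pvMark s r y).set r 'X' = pvMark s (r + 1) y := by
  apply List.ext_getElem (by simp [pvMark])
  intro k hk _
  rw [List.getElem_set]
  simp only [pvMark, List.getElem_mapIdx]
  split_ifs with h h2 h3 <;> first | rfl | omega

theorem pvMark_set_Y (s : List Char) (x y y' j : Nat)
    (hb : s.getD j 'a' = 'b') (hxj : x ≤ j) (hjy' : j < y') (hyy' : y ≤ y')
    (hbet : ∀ k, k < s.length → s.getD k 'a' = 'b' → y ≤ k → k < y' → k = j) :
    (pvMark s x y).set j 'Y' = pvMark s x y' := by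
  apply List.ext_getElem (by simp [pvMark])
  intro k hk hk'
  have hkl : k < s.length := by simpa [pvMark] using hk'
  have hgd : s.getD k 'a' = s[k] := List.getD_eq_getElem s 'a' hkl
  rw [List.getElem_set]
  simp only [pvMark, List.getElem_mapIdx]
  by_cases hkj : j = k
  · subst hkj
    rw [if_pos rfl, if_neg (by omega), if_pos ⟨by rw [← hgd]; exact hb, hjy'⟩]
  · rw [if_neg hkj]
    by_cases h1 : k < x
    · simp [h1]
    · rw [if_neg h1, if_neg h1]
      by_cases h2 : s[k] = 'b'
      · by_cases h3 : k < y
        · rw [if_pos ⟨h2, h3⟩, if_pos ⟨h2, by omega⟩]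
        · have h4 : ¬ k < y' := by
            by_contra h4
            exact hkj ((hbet k hkl (by rw [hgd]; exact h2) (by omega) h4)).symm
          rw [if_neg (by tauto), if_neg (by tauto)]
      · rw [if_neg (by tauto), if_neg (by tauto)]

theorem pvLA_q2 (t2 : List Char) (r : Nat)
    (hX : PySem.List.pyGet? t2 (r : Int) = some 'X') :
    ∀ (d fuel : Nat) (pasos : List (String × String × Int)),
    r + d < t2.length →
    (∀ m : Nat, r < m → m ≤ r + d → ∀ c, PySem.List.pyGet? t2 (m : Int) = some c → c ≠ 'X') →
    simular_mt_loopA (fuel + d + 1) t2 "q2" ((r : Int) + (d : Int)) pasos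
      = simular_mt_loopA fuel t2 "q0" ((r : Int) + 1)
          (pasos ++ (PySem.List.pyRange ((r : Int) + (d : Int)) ((r : Int) - 1) (-1)).map
            (fun k => ("q2", String.ofList t2, k))) := by
  intro d
  induction d with
  | zero =>
    intro fuel pasos hlen _
    have hX' : t2[r]? = some 'X' := by simpa using hX
    rw [simular_mt_loopA, if_neg (by push_cast; omega)]
    rw [PySem.List.pyRange_neg_one_cons (by omega), PySem.List.pyRange_neg_one_eq_nil (by omega)]
    simp [hX']
  | succ d ih =>
    intro fuel pasos hlen hbody
    have hkl : (r + (d + 1)) < t2.length := by omega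
    have hget : PySem.List.pyGet? t2 ((r : Int) + ((d + 1 : Nat) : Int))
        = some (t2[r + (d + 1)]'hkl) := by
      rw [show (r : Int) + ((d + 1 : Nat) : Int) = ((r + (d + 1) : Nat) : Int) by push_cast; ring]
      rw [PySem.List.pyGet?_natCast, List.getElem?_eq_getElem hkl]
    have hc : t2[r + (d + 1)]'hkl ≠ 'X' := by
      apply hbody (r + (d + 1)) (by omega) (by omega)
      rw [PySem.List.pyGet?_natCast, List.getElem?_eq_getElem hkl]
    rw [simular_mt_loopA, if_neg (by push_cast; omega), hget]
    simp only [String.reduceEq, if_false, hc, ite_not, if_false, ite_false, if_neg hc]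
    rw [show ((r : Int) + ((d + 1 : Nat) : Int)) - 1 = (r : Int) + (d : Int) by push_cast; ring]
    rw [show fuel + (d + 1) = (fuel + d) + 1 by omega]
    rw [ih fuel (pasos ++ [("q2", String.ofList t2, (r : Int) + ((d + 1 : Nat) : Int))])
      (by omega) (fun m h1 h2 => hbody m h1 (by omega))]
    rw [PySem.List.pyRange_neg_one_cons (a := (r : Int) + ((d + 1 : Nat) : Int)) (by push_cast; omega)]
    rw [show (r : Int) + ((d + 1 : Nat) : Int) - 1 = (r : Int) + (d : Int) by push_cast; ring]
    simp

theorem pvLA_q1 (t1 : List Char) (j : Nat) (hj : j < t1.length)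
    (hb : PySem.List.pyGet? t1 (j : Int) = some 'b') :
    ∀ (d fuel : Nat) (pasos : List (String × String × Int)), d ≤ j →
    (∀ m : Nat, j - d ≤ m → m < j → ∀ c, PySem.List.pyGet? t1 (m : Int) = some c → c = 'a' ∨ c = 'Y') →
    simular_mt_loopA (fuel + d + 1) t1 "q1" (((j - d : Nat) : Int)) pasos
      = simular_mt_loopA fuel (PySem.List.pySetD t1 (j : Int) 'Y') "q2" ((j : Int) - 1)
          (pasos ++ (PySem.List.pyRange (((j - d : Nat) : Int)) ((j : Int) + 1) 1).map
            (fun k => ("q1", String.ofList t1, k))) := by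
  intro d
  induction d with
  | zero =>
    intro fuel pasos _ _
    rw [simular_mt_loopA, if_neg (by push_cast; omega)]
    simp only [Nat.sub_zero, hb]
    rw [PySem.List.pyRange_one_singleton]
    simp
  | succ d ih =>
    intro fuel pasos hd hbody
    have hkl : (j - (d + 1)) < t1.length := by omega
    have hget : PySem.List.pyGet? t1 (((j - (d + 1) : Nat) : Int))
        = some (t1[j - (d + 1)]'hkl) := by
      rw [PySem.List.pyGet?_natCast, List.getElem?_eq_getElem hkl]
    have hc := hbody (j - (d + 1)) (by omega) (by omega) _ hget
    rw [simular_mt_loopA, if_neg (by push_cast; omega), hget]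
    rw [show fuel + (d + 1) = (fuel + d) + 1 by omega]
    have harg : ((j - (d + 1) : Nat) : Int) + 1 = ((j - d : Nat) : Int) := by
      omega
    have hrange : PySem.List.pyRange (((j - (d + 1) : Nat) : Int)) ((j : Int) + 1) 1
        = ((j - (d + 1) : Nat) : Int) :: PySem.List.pyRange (((j - d : Nat) : Int)) ((j : Int) + 1) 1 := by
      rw [PySem.List.pyRange_one_cons (by omega), harg]
    have hrec := ih fuel (pasos ++ [("q1", String.ofList t1, ((j - (d + 1) : Nat) : Int))])
      (by omega) (fun m h1 h2 => hbody m (by omega) h2)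
    rcases hc with hc | hc <;>
      simp only [hc, String.reduceEq, Char.reduceEq, if_true, if_false, ite_true, ite_false] <;>
      rw [harg, hrec, hrange] <;> simp

theorem pvLA_q1off (t1 : List Char) :
    ∀ (d fuel : Nat) (pasos : List (String × String × Int)), d ≤ t1.length →
    (∀ m : Nat, t1.length - d ≤ m → m < t1.length → ∀ c, PySem.List.pyGet? t1 (m : Int) = some c → c = 'a' ∨ c = 'Y') →
    simular_mt_loopA (fuel + d + 1) t1 "q1" (((t1.length - d : Nat) : Int)) pasos
      = ("Cadena inválida",
          pasos ++ (PySem.List.pyRange (((t1.length - d : Nat) : Int)) ((t1.length : Int) + 1) 1).map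
            (fun k => ("q1", String.ofList t1, k))) := by
  intro d
  induction d with
  | zero =>
    intro fuel pasos _ _
    rw [simular_mt_loopA, if_pos (by push_cast; omega)]
    simp only [Nat.sub_zero]
    rw [PySem.List.pyRange_one_singleton]
    simp
  | succ d ih =>
    intro fuel pasos hd hbody
    have hkl : (t1.length - (d + 1)) < t1.length := by omega
    have hget : PySem.List.pyGet? t1 (((t1.length - (d + 1) : Nat) : Int))
        = some (t1[t1.length - (d + 1)]'hkl) := by
      rw [PySem.List.pyGet?_natCast, List.getElem?_eq_getElem hkl]
    have hc := hbody (t1.length - (d + 1)) (by omega) (by omega) _ hget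
    rw [simular_mt_loopA, if_neg (by push_cast; omega), hget]
    rw [show fuel + (d + 1) = (fuel + d) + 1 by omega]
    have harg : ((t1.length - (d + 1) : Nat) : Int) + 1 = ((t1.length - d : Nat) : Int) := by
      omega
    have hrange : PySem.List.pyRange (((t1.length - (d + 1) : Nat) : Int)) ((t1.length : Int) + 1) 1
        = ((t1.length - (d + 1) : Nat) : Int)
            :: PySem.List.pyRange (((t1.length - d : Nat) : Int)) ((t1.length : Int) + 1) 1 := by
      rw [PySem.List.pyRange_one_cons (by omega), harg]
    have hrec := ih fuel (pasos ++ [("q1", String.ofList t1, ((t1.length - (d + 1) : Nat) : Int))])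
      (by omega) (fun m h1 h2 => hbody m (by omega) h2)
    rcases hc with hc | hc <;>
      simp only [hc, String.reduceEq, Char.reduceEq, if_true, if_false, ite_true, ite_false] <;>
      rw [harg, hrec, hrange] <;> simp

theorem pvAccept (s : List Char) (r : Nat)
    (hs : ∀ c ∈ s, c = 'a' ∨ c = 'b')
    (hH : ∀ m, m < r → m < s.length → s.getD m 'a' = 'a')
    (hrb : r ≤ (pvBposN s).length) (hrn : r < s.length) :
    ((pvMark s r (pvThr s r)).any (fun c => c == 'a' || c == 'b') = false)
      ↔ (s.length = 2 * r ∧ pvBposN s = (List.range (s.length - r)).map (fun k => r + k)) := by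
  have hmem : ∀ k, k ∈ (List.range (s.length - r)).map (fun k => r + k) ↔ (r ≤ k ∧ k < s.length) := by
    intro k
    simp only [List.mem_map, List.mem_range]
    constructor
    · rintro ⟨m, hm, rfl⟩; omega
    · intro h; exact ⟨k - r, by omega, by omega⟩
  have hP : ((pvMark s r (pvThr s r)).any (fun c => c == 'a' || c == 'b') = false)
      ↔ ∀ k, r ≤ k → ∀ hk : k < s.length, (s.getD k 'a' = 'b' ∧ k < pvThr s r) := by
    rw [List.any_eq_false]
    constructor
    · intro h k hrk hk
      have hmk := h ((pvMark s r (pvThr s r))[k]'(by rw [pvMark_length]; exact hk))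
        (List.getElem_mem _)
      by_contra hne
      simp only [pvMark, List.getElem_mapIdx] at hmk
      rw [if_neg (by omega)] at hmk
      have hgd : s.getD k 'a' = s[k] := List.getD_eq_getElem s 'a' hk
      rw [if_neg (by rw [← hgd]; exact hne)] at hmk
      rcases hs s[k] (List.getElem_mem hk) with h' | h' <;> rw [h'] at hmk <;> simp at hmk
    · intro h c hc
      obtain ⟨k, hk, hck⟩ := List.mem_iff_getElem.mp hc
      have hkl : k < s.length := by rw [pvMark_length] at hk; exact hk
      simp only [pvMark, List.getElem_mapIdx] at hck
      by_cases h1 : k < r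
      · rw [if_pos h1] at hck; subst hck; decide
      · have hgd : s.getD k 'a' = s[k] := List.getD_eq_getElem s 'a' hkl
        obtain ⟨hb, hthr⟩ := h k (by omega) hkl
        rw [if_neg h1, if_pos ⟨by rw [← hgd]; exact hb, hthr⟩] at hck
        subst hck; decide
  rw [hP]
  constructor
  · intro h
    have hnotlt : ¬ r < (pvBposN s).length := by
      intro hlt
      have he := pvBposN_elem s r hlt
      have hge := pvBposN_ge s r _ hH (List.getElem_mem hlt)
      have := (h _ hge he.1).2
      rw [pvThr, dif_pos hlt] at this
      omega
    have hlen : (pvBposN s).length = r := by omega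
    have hthr : pvThr s r = s.length := by rw [pvThr, dif_neg hnotlt]
    have hmemeq : ∀ k, k ∈ pvBposN s ↔ k ∈ (List.range (s.length - r)).map (fun k => r + k) := by
      intro k
      rw [hmem, pvBposN_mem]
      constructor
      · intro hk; exact ⟨pvBposN_ge s r _ hH ((pvBposN_mem s k).mpr hk), hk.1⟩
      · intro hk; exact ⟨hk.2, (h k hk.1 hk.2).1⟩
    have hpw2 : ((List.range (s.length - r)).map (fun k => r + k)).Pairwise (· < ·) :=
      List.Pairwise.map _ (fun h => by omega) List.pairwise_lt_range
    have heq : pvBposN s = (List.range (s.length - r)).map (fun k => r + k) := by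
      exact List.Perm.eq_of_pairwise (fun a b _ _ h1 h2 => by omega)
        (pvBposN_pairwise s) hpw2
        ((List.perm_ext_iff_of_nodup ((pvBposN_pairwise s).nodup) (hpw2.nodup)).mpr hmemeq)
    have : (pvBposN s).length = s.length - r := by rw [heq]; simp
    exact ⟨by omega, heq⟩
  · rintro ⟨h2r, heq⟩
    have hlen : (pvBposN s).length = r := by rw [heq]; simp; omega
    have hthr : pvThr s r = s.length := by rw [pvThr, dif_neg (by omega)]
    intro k hrk hk
    have : k ∈ pvBposN s := by rw [heq, hmem]; exact ⟨hrk, hk⟩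
    rw [pvBposN_mem] at this
    exact ⟨this.2, by omega⟩

theorem pvMain (s : List Char) (hs : ∀ c ∈ s, c = 'a' ∨ c = 'b') :
    ∀ (fm r : Nat), s.length - r ≤ fm →
    r ≤ s.length → r ≤ (pvBposN s).length →
    (∀ m, m < r → m < s.length → s.getD m 'a' = 'a') →
    ∀ (fuel : Nat) (pasos : List (String × String × Int)),
    (s.length - r) * (2 * s.length + 2) + 2 ≤ fuel →
    simular_mt_loopA fuel (pvMark s r (pvThr s r)) "q0" (r : Int) pasos
      = simular_mt_loopB s (pvBpos s) (pvMark s r (pvThr s r)) (r : Int) pasos := by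
  intro fm
  induction fm with
  | zero =>
    intro r h0 hrn hrb hH fuel pasos hfuel
    -- r = s.length: both terminate immediately
    have hr : r = s.length := by omega
    obtain ⟨f, rfl⟩ : ∃ f, fuel = f + 1 := ⟨fuel - 1, by omega⟩
    rw [simular_mt_loopA, if_pos (by rw [pvMark_length]; omega), simular_mt_loopB,
      if_neg (by push_cast; omega), if_pos (by push_cast; omega)]
  | succ fm ih =>
    intro r h0 hrn hrb hH fuel pasos hfuel
    by_cases hreq : r = s.length
    · obtain ⟨f, rfl⟩ : ∃ f, fuel = f + 1 := ⟨fuel - 1, by omega⟩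
      rw [simular_mt_loopA, if_pos (by rw [pvMark_length]; omega), simular_mt_loopB,
        if_neg (by push_cast; omega), if_pos (by push_cast; omega)]
    · have hrlt : r < s.length := by omega
      have hgd : s.getD r 'a' = s[r] := List.getD_eq_getElem s 'a' hrlt
      have hsg : PySem.List.pyGet? s (r : Int) = some s[r] := by
        rw [PySem.List.pyGet?_natCast, List.getElem?_eq_getElem hrlt]
      rcases hs s[r] (List.getElem_mem hrlt) with hc | hc
      · -- s[r] = 'a' : one full marking round
        have hread : PySem.List.pyGet? (pvMark s r (pvThr s r)) ((r : Nat) : Int) = some 'a' := by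
          rw [pvMark_pyGet s r (pvThr s r) r hrlt]
          rw [if_neg (by omega), if_neg (fun h => by rw [hgd, hc] at h; exact absurd h.1 (by decide)),
            hgd, hc]
        have hBguard : ((r : Int) < (s.length : Int) ∧ PySem.List.pyGet? s (r : Int) = some 'a') :=
          ⟨by omega, by rw [hsg, hc]⟩
        have hBlen : ¬ ((s.length : Int) ≤ (r : Int)) := by omega
        have ht1 : PySem.List.pySetD (pvMark s r (pvThr s r)) ((r : Nat) : Int) 'X'
            = pvMark s (r + 1) (pvThr s r) := by
          rw [PySem.List.pySetD_natCast]
          exact pvMark_set_X s r _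
        have hlenbp : (pvBpos s).length = (pvBposN s).length := by rw [pvBpos_eq]; simp
        have hmul : 2 * s.length + 2 ≤ (s.length - r) * (2 * s.length + 2) :=
          Nat.le_mul_of_pos_left _ (by omega)
        have ht1len : (pvMark s (r + 1) (pvThr s r)).length = s.length := pvMark_length s _ _
        by_cases hre : r < (pvBposN s).length
        · -- a b remains at j = bpos[r]: full round, then recurse
          obtain ⟨j, hjeq⟩ : ∃ j, (pvBposN s)[r]'hre = j := ⟨_, rfl⟩
          have hjn : j < s.length := hjeq ▸ (pvBposN_elem s r hre).1
          have hjb : s.getD j 'a' = 'b' := hjeq ▸ (pvBposN_elem s r hre).2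
          have hjr : r + 1 ≤ j := by
            have h1 : r ≤ j := hjeq ▸ pvBposN_ge s r _ hH (List.getElem_mem hre)
            rcases Nat.eq_or_lt_of_le h1 with h | h
            · rw [← h] at hjb; rw [hgd, hc] at hjb; exact absurd hjb (by decide)
            · omega
          have hthr_eq : pvThr s r = j := by rw [pvThr, dif_pos hre]; exact hjeq
          have hgetb : PySem.List.pyGet? (pvBpos s) ((r : Nat) : Int) = some ((j : Nat) : Int) := by
            rw [PySem.List.pyGet?_natCast, pvBpos_eq, List.getElem?_map,
              List.getElem?_eq_getElem hre, hjeq]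
            rfl
          have hbplen : ¬ (((pvBpos s).length : Int) ≤ (r : Int)) := by
            rw [hlenbp]; omega
          -- the tape after writing X at r
          have hbj : PySem.List.pyGet? (pvMark s (r + 1) (pvThr s r)) ((j : Nat) : Int) = some 'b' := by
            rw [pvMark_pyGet s (r + 1) (pvThr s r) j hjn, hthr_eq]
            rw [if_neg (by omega), if_neg (fun h => absurd h.2 (by omega)), hjb]
          have hq1body : ∀ m : Nat, j - (j - (r + 1)) ≤ m → m < j →
              ∀ c, PySem.List.pyGet? (pvMark s (r + 1) (pvThr s r)) ((m : Nat) : Int) = some c →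
              c = 'a' ∨ c = 'Y' := by
            intro m h1 h2 c hcg
            rw [pvMark_pyGet s (r + 1) (pvThr s r) m (by omega), hthr_eq] at hcg
            rw [if_neg (by omega)] at hcg
            by_cases hbm : s.getD m 'a' = 'b' ∧ m < j
            · rw [if_pos hbm] at hcg; right; exact (Option.some_inj.mp hcg).symm
            · rw [if_neg hbm] at hcg
              left
              have hm2 : m < s.length := by omega
              rcases hs (s[m]'hm2) (List.getElem_mem hm2) with h | h
              · rw [List.getD_eq_getElem s 'a' hm2, h] at hcg
                exact (Option.some_inj.mp hcg).symm
              · exfalso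
                exact hbm ⟨by rw [List.getD_eq_getElem s 'a' hm2, h], h2⟩
          -- the tape after also writing Y at j
          have hthr2_gt : j < pvThr s (r + 1) := by
            rw [pvThr]
            split
            · rename_i hlt
              have := pvBposN_mono s r (r + 1) (by omega) hlt
              rw [hjeq] at this
              exact this
            · omega
          have hbet : ∀ k, k < s.length → s.getD k 'a' = 'b' → pvThr s r ≤ k →
              k < pvThr s (r + 1) → k = j := by
            intro k hkn hkb hk1 hk2
            rw [hthr_eq] at hk1
            obtain ⟨m, hm, hmk⟩ := List.mem_iff_getElem.mp ((pvBposN_mem s k).mpr ⟨hkn, hkb⟩)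
            rcases Nat.lt_or_ge m (r + 1) with h | h
            · rcases Nat.lt_or_ge m r with h' | h'
              · have hlt2 := pvBposN_mono s m r h' hre
                rw [hmk, hjeq] at hlt2
                omega
              · have hmr : m = r := by omega
                subst hmr
                exact hmk.symm.trans hjeq
            · by_cases hr1 : r + 1 < (pvBposN s).length
              · rw [pvThr, dif_pos hr1] at hk2
                have hle2 : (pvBposN s)[r + 1] ≤ (pvBposN s)[m]'hm := by
                  rcases Nat.eq_or_lt_of_le h with h' | h'
                  · subst h'; exact le_refl _
                  · exact le_of_lt (pvBposN_mono s (r + 1) m h' hm)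
                rw [hmk] at hle2
                omega
              · omega
          have ht2 : PySem.List.pySetD (pvMark s (r + 1) (pvThr s r)) ((j : Nat) : Int) 'Y'
              = pvMark s (r + 1) (pvThr s (r + 1)) := by
            rw [PySem.List.pySetD_natCast]
            exact pvMark_set_Y s (r + 1) (pvThr s r) (pvThr s (r + 1)) j hjb
              (by omega) hthr2_gt (by rw [hthr_eq]; omega) hbet
          have hX2 : PySem.List.pyGet? (pvMark s (r + 1) (pvThr s (r + 1))) ((r : Nat) : Int)
              = some 'X' := by
            rw [pvMark_pyGet s (r + 1) (pvThr s (r + 1)) r hrlt, if_pos (by omega)]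
          have hq2body : ∀ m : Nat, r < m → m ≤ r + (j - 1 - r) →
              ∀ c, PySem.List.pyGet? (pvMark s (r + 1) (pvThr s (r + 1))) ((m : Nat) : Int) = some c →
              c ≠ 'X' := by
            intro m h1 h2 c hcg
            rw [pvMark_pyGet s (r + 1) (pvThr s (r + 1)) m (by omega)] at hcg
            rw [if_neg (by omega)] at hcg
            by_cases hbm : s.getD m 'a' = 'b' ∧ m < pvThr s (r + 1)
            · rw [if_pos hbm] at hcg
              rw [← Option.some_inj.mp hcg]
              decide
            · rw [if_neg hbm] at hcg
              rw [← Option.some_inj.mp hcg]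
              have hm2 : m < s.length := by omega
              rcases hs (s[m]'hm2) (List.getElem_mem hm2) with h | h <;>
                rw [List.getD_eq_getElem s 'a' hm2, h] <;> decide
          -- fuel bookkeeping
          obtain ⟨f3, hf3, rfl⟩ : ∃ f3, (s.length - (r + 1)) * (2 * s.length + 2) + 2 ≤ f3 ∧
              fuel = ((f3 + (j - 1 - r) + 1) + (j - (r + 1)) + 1) + 1 := by
            have hmul2 : (s.length - r) * (2 * s.length + 2)
                = (s.length - (r + 1)) * (2 * s.length + 2) + (2 * s.length + 2) := by
              rw [show s.length - r = (s.length - (r + 1)) + 1 by omega, Nat.succ_mul]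
            exact ⟨fuel - ((j - 1 - r) + (j - (r + 1)) + 3), by omega, by omega⟩
          -- A: the q0 step
          rw [simular_mt_loopA, if_neg (by rw [pvMark_length]; exact hBlen), hread]
          simp only [String.reduceEq, Char.reduceEq, if_true, if_false, reduceIte]
          rw [ht1]
          -- A: the q1 sweep to j
          have E1 := pvLA_q1 (pvMark s (r + 1) (pvThr s r)) j (by rw [ht1len]; exact hjn)
            hbj (j - (r + 1)) (f3 + (j - 1 - r) + 1)
            (pasos ++ [("q0", String.ofList (pvMark s r (pvThr s r)), (r : Int))])
            (by omega) hq1body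
          rw [show j - (j - (r + 1)) = r + 1 by omega] at E1
          push_cast at E1
          rw [E1, ht2]
          -- A: the q2 sweep back to r
          have E2 := pvLA_q2 (pvMark s (r + 1) (pvThr s (r + 1))) r hX2 (j - 1 - r) f3
            ((pasos ++ [("q0", String.ofList (pvMark s r (pvThr s r)), (r : Int))]) ++
              (PySem.List.pyRange ((r : Int) + 1) ((j : Int) + 1) 1).map
                (fun k => ("q1", String.ofList (pvMark s (r + 1) (pvThr s r)), k)))
            (by rw [pvMark_length]; omega) hq2body
          have hidx : (r : Int) + ((j - 1 - r : Nat) : Int) = (j : Int) - 1 := by omega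
          rw [hidx] at E2
          rw [E2]
          -- A = B via the induction hypothesis at r + 1
          have hH' : ∀ m, m < r + 1 → m < s.length → s.getD m 'a' = 'a' := by
            intro m hm hmn
            rcases Nat.lt_or_ge m r with h | h
            · exact hH m h hmn
            · have hmr : m = r := by omega
              rw [hmr, hgd, hc]
          have IH := fun pasos' => ih (r + 1) (by omega) (by omega) (by omega) hH' f3 pasos' hf3
          push_cast at IH
          rw [IH]
          -- B: unfold one round and normalise the folds
          conv_rhs => rw [simular_mt_loopB]
          rw [if_pos hBguard]
          rw [ht1]
          rw [if_neg hbplen]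
          rw [hgetb]
          simp only [PySem.List.foldl_append_singleton_eq_map]
          rw [ht2]
        · -- no b left: the q1 sweep falls off the right end, both reject
          have hthr_eq : pvThr s r = s.length := by rw [pvThr, dif_neg (by omega)]
          have hbplen : (((pvBpos s).length : Int) ≤ (r : Int)) := by rw [hlenbp]; omega
          have hq1body : ∀ m : Nat,
              (pvMark s (r + 1) (pvThr s r)).length - (s.length - (r + 1)) ≤ m →
              m < (pvMark s (r + 1) (pvThr s r)).length →
              ∀ c, PySem.List.pyGet? (pvMark s (r + 1) (pvThr s r)) ((m : Nat) : Int) = some c →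
              c = 'a' ∨ c = 'Y' := by
            intro m h1 h2 c hcg
            rw [ht1len] at h1 h2
            rw [pvMark_pyGet s (r + 1) (pvThr s r) m h2, hthr_eq] at hcg
            rw [if_neg (by omega)] at hcg
            by_cases hbm : s.getD m 'a' = 'b' ∧ m < s.length
            · rw [if_pos hbm] at hcg; right; exact (Option.some_inj.mp hcg).symm
            · rw [if_neg hbm] at hcg
              left
              rcases hs (s[m]'h2) (List.getElem_mem h2) with h | h
              · rw [List.getD_eq_getElem s 'a' h2, h] at hcg
                exact (Option.some_inj.mp hcg).symm
              · exfalso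
                exact hbm ⟨by rw [List.getD_eq_getElem s 'a' h2, h], h2⟩
          obtain ⟨f1, rfl⟩ : ∃ f1,
              fuel = (f1 + (s.length - (r + 1)) + 1) + 1 :=
            ⟨fuel - ((s.length - (r + 1)) + 2), by omega⟩
          rw [simular_mt_loopA, if_neg (by rw [pvMark_length]; exact hBlen), hread]
          simp only [String.reduceEq, Char.reduceEq, if_true, if_false, reduceIte]
          rw [ht1]
          have E1 := pvLA_q1off (pvMark s (r + 1) (pvThr s r)) (s.length - (r + 1)) f1
            (pasos ++ [("q0", String.ofList (pvMark s r (pvThr s r)), (r : Int))])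
            (by rw [ht1len]; omega) hq1body
          rw [ht1len, show s.length - (s.length - (r + 1)) = r + 1 by omega] at E1
          push_cast at E1
          rw [E1]
          conv_rhs => rw [simular_mt_loopB]
          rw [if_pos hBguard, ht1, if_pos hbplen]
          simp only [PySem.List.foldl_append_singleton_eq_map]
      · -- s[r] = 'b' : A reads 'b' (r = 0) or 'Y' (r ≥ 1): terminal
        have hbm : r ∈ pvBposN s := (pvBposN_mem s r).mpr ⟨hrlt, by rw [hgd]; exact hc⟩
        obtain ⟨hpos, hle⟩ := pvBposN_least s r hbm
        have hge0 : r ≤ (pvBposN s)[0] := pvBposN_ge s r _ hH (List.getElem_mem hpos)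
        have hbp0 : (pvBposN s)[0] = r := by omega
        have hBguard : ¬ ((r : Int) < (s.length : Int) ∧ PySem.List.pyGet? s (r : Int) = some 'a') := by
          rintro ⟨-, h⟩
          rw [hsg, hc] at h
          simp at h
        have hBlen : ¬ ((s.length : Int) ≤ (r : Int)) := by omega
        by_cases hr0 : r = 0
        · subst hr0
          have hthr : pvThr s 0 = 0 := by rw [pvThr, dif_pos hpos, hbp0]
          have hread : PySem.List.pyGet? (pvMark s 0 (pvThr s 0)) ((0 : Nat) : Int) = some 'b' := by
            rw [pvMark_pyGet s 0 (pvThr s 0) 0 hrlt, hthr]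
            rw [if_neg (by omega), if_neg (fun h => absurd h.2 (by omega)), hgd, hc]
          obtain ⟨f, rfl⟩ : ∃ f, fuel = f + 1 := ⟨fuel - 1, by omega⟩
          rw [simular_mt_loopA, if_neg (by rw [pvMark_length]; exact hBlen), hread]
          conv_rhs => rw [simular_mt_loopB, if_neg hBguard, if_neg hBlen,
            if_pos (show ((0 : Nat) : Int) = 0 by norm_num)]
          simp
        · have hrne : ¬ ((r : Nat) : Int) = 0 := by omega
          have hthr_gt : r < pvThr s r := by
            rw [pvThr]
            split
            · rename_i hlt
              have := pvBposN_mono s 0 r (by omega) hlt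
              omega
            · omega
          have hread : PySem.List.pyGet? (pvMark s r (pvThr s r)) ((r : Nat) : Int) = some 'Y' := by
            rw [pvMark_pyGet s r (pvThr s r) r hrlt]
            rw [if_neg (by omega), if_pos ⟨by rw [hgd]; exact hc, hthr_gt⟩]
          obtain ⟨f, rfl⟩ : ∃ f, fuel = f + 1 + 1 := ⟨fuel - 2, by omega⟩
          rw [simular_mt_loopA, if_neg (by rw [pvMark_length]; exact hBlen), hread]
          simp only [String.reduceEq, Char.reduceEq, if_true, if_false, ite_true, ite_false,
            reduceIte]
          rw [simular_mt_loopA, if_neg (by rw [pvMark_length]; exact hBlen), hread]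
          simp only [String.reduceEq, Char.reduceEq, if_true, if_false, ite_true, ite_false,
            reduceIte]
          have hinj : Function.Injective (fun k : Nat => (k : Int)) := fun a b h => by
            simpa using h
          have hpr : PySem.List.pyRange ((r : Nat) : Int) ((s.length : Nat) : Int) 1
              = ((List.range (s.length - r)).map (fun k => r + k)).map (fun k : Nat => (k : Int)) := by
            rw [PySem.List.pyRange_one, List.map_map,
              show ((s.length : Int) - (r : Int)).toNat = s.length - r by omega]
            apply List.map_congr_left
            intro a _
            simp [Function.comp_def]
          have hCiff : ((s.length : Int) = 2 * (r : Int) ∧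
              pvBpos s = PySem.List.pyRange ((r : Nat) : Int) ((s.length : Nat) : Int) 1)
              ↔ (s.length = 2 * r ∧
                 pvBposN s = (List.range (s.length - r)).map (fun k => r + k)) := by
            constructor
            · rintro ⟨ha, hb⟩
              refine ⟨by omega, ?_⟩
              apply List.map_injective_iff.mpr hinj
              rw [← hpr, ← pvBpos_eq]
              exact hb
            · rintro ⟨ha, hb⟩
              exact ⟨by omega, by rw [pvBpos_eq, hb, ← hpr]⟩
          have hAcc := pvAccept s r hs hH hrb hrlt
          cases hany : (pvMark s r (pvThr s r)).any (fun c => c == 'a' || c == 'b') with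
          | false =>
            rw [if_neg (by simp [hany])]
            conv_rhs => rw [simular_mt_loopB, if_neg hBguard, if_neg hBlen, if_neg hrne,
              if_pos (hCiff.mpr (hAcc.mp hany))]
          | true =>
            rw [if_pos (by simp [hany])]
            have hCneg : ¬ ((s.length : Int) = 2 * (r : Int) ∧
                pvBpos s = PySem.List.pyRange ((r : Nat) : Int) ((s.length : Nat) : Int) 1) := by
              intro hC
              rw [hAcc.mpr (hCiff.mp hC)] at hany
              exact Bool.false_ne_true hany
            conv_rhs => rw [simular_mt_loopB, if_neg hBguard, if_neg hBlen, if_neg hrne,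
              if_neg hCneg]

theorem pvMark_zero (s : List Char) : pvMark s 0 (pvThr s 0) = s := by
  apply List.ext_getElem (pvMark_length s _ _)
  intro k hk hk'
  simp only [pvMark, List.getElem_mapIdx]
  rw [if_neg (by omega)]
  have hgd : s.getD k 'a' = s[k] := List.getD_eq_getElem s 'a' hk'
  by_cases hb : s[k] = 'b' ∧ k < pvThr s 0
  · exfalso
    obtain ⟨hpos, hle⟩ := pvBposN_least s k ((pvBposN_mem s k).mpr ⟨hk', by rw [hgd]; exact hb.1⟩)
    have := hb.2
    rw [pvThr, dif_pos hpos] at this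
    omega
  · rw [if_neg hb]

theorem pvTop : ∀ (cadena : String), simular_mt cadena = simular_mt_alt cadena := by
  intro cadena
  unfold simular_mt simular_mt_alt
  by_cases hP : ∀ c ∈ cadena.toList, c = 'a' ∨ c = 'b'
  · have hA : PySem.Set.issubset (PySem.Set.ofList cadena.toList) (PySem.Set.ofList ['a', 'b']) = true := by
      rw [PySem.Set.issubset_iff]
      intro x hx
      rw [PySem.Set.mem_ofList] at hx ⊢
      simpa using hP x hx
    have hB : PySem.Set.diff (PySem.Set.ofList cadena.toList) ['a', 'b'] = [] := by
      rw [List.eq_nil_iff_forall_not_mem]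
      intro x hx
      rw [PySem.Set.mem_diff, PySem.Set.mem_ofList] at hx
      rcases hP x hx.1 with h | h <;> exact hx.2 (by simp [h])
    rw [hA, hB]
    simp only [Bool.not_true, Bool.false_eq_true, if_false, ne_eq, not_true_eq_false,
      reduceIte]
    have hmul : cadena.toList.length * (2 * cadena.toList.length + 2)
        ≤ (cadena.toList.length + 1) * (2 * cadena.toList.length + 2) :=
      Nat.mul_le_mul_right _ (by omega)
    have := pvMain cadena.toList hP (cadena.toList.length) 0 (by omega) (by omega) (by omega)
      (by omega) ((cadena.toList.length + 1) * (2 * cadena.toList.length + 2) + 2) []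
      (by simp only [Nat.sub_zero]; omega)
    rw [pvMark_zero] at this
    simpa using this
  · have hA : PySem.Set.issubset (PySem.Set.ofList cadena.toList) (PySem.Set.ofList ['a', 'b']) = false := by
      rw [Bool.eq_false_iff]
      intro hx
      rw [PySem.Set.issubset_iff] at hx
      exact hP (fun c hc => by
        simpa using hx c (by rwa [PySem.Set.mem_ofList]))
    have hB : ¬ PySem.Set.diff (PySem.Set.ofList cadena.toList) ['a', 'b'] = [] := by
      push Not at hP
      obtain ⟨x, hx, hxa, hxb⟩ := hP
      intro hnil
      rw [List.eq_nil_iff_forall_not_mem] at hnil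
      exact hnil x (by
        rw [PySem.Set.mem_diff, PySem.Set.mem_ofList]
        exact ⟨hx, by simp [hxa, hxb]⟩)
    rw [hA]
    simp only [Bool.not_false, if_true, ne_eq, hB, not_false_eq_true, reduceIte]

-- ===== VERDICT (by name: the statement is the Claim_ definition above) =====
theorem simular_mt_spec : Claim_equal_simular_mt := by
  intro cadena _
  exact pvTop cadena
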